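-- pv_equiv track=rewrite | github.com/arash-shahmansoori/dynamic-consent-management | compute_optimal_buckets/dp_unique_opt_bkts.py | unique_opt_seq_final
-- ===== SOURCE A (Python) =====
-- def unique_opt_seq_final(S):
--     # This function returns the corresponding indices of unique values of
--     # the optimal buckets in a list dynamically.
--     # [Note]: "-1" is to indicate the optimal bucket ID selected for the speaker "i+1"
--     # already exists for the speaker(s): 0,...,i.
--     # Outputs:
--     #           indx_out: indices of unique current values in a list
--     #           S_out   : new list with the removed selected values from the previous step
--     #           bkt_out : list of optimal buckets for registration
--     #
--     # Inputs:
--     #           S     : the list of optimal buckets for registering the new speakers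
--
--     # L = len(S)
--
--     bkt_out = []  # Base case
--
--     # Dynamic program to find the first unique optimal bucket (Decision problem)
--     for i, l in enumerate(S):
--         if l in bkt_out:
--             bkt_out[: i + 1] = bkt_out[:i] + [-1]
--         elif l not in bkt_out:
--             bkt_out[: i + 1] = bkt_out[:i] + [l]
--
--     # To return the corresponding index of the unique optimal current buckets
--     indx_out = []
--     for j, b in enumerate(bkt_out):
--         if b >= 0:
--             indx_out.append(j)
--
--     S_out = [i for j, i in enumerate(S) if j not in indx_out]
--
--     return indx_out, S_out, bkt_out
-- ===== SOURCE B (Python) =====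
-- def unique_opt_seq_final(S):
--     # One pass: a 'seen' set replaces A's three scans (build bkt_out, rescan
--     # for indices, recompute S_out); all three outputs are written together.
--     seen = set()
--     indx_out = []
--     S_out = []
--     bkt_out = []
--     for i, l in enumerate(S):
--         if l in seen:
--             bkt_out.append(-1)
--             S_out.append(l)
--         else:
--             seen.add(l)
--             bkt_out.append(l)
--             if l >= 0:
--                 indx_out.append(i)
--             else:
--                 S_out.append(l)
--     return indx_out, S_out, bkt_out
-- ===== Notes on version B (the rewrite author's own statement) =====
-- stated objective: faster
-- what changed: Replaces A's three scans (list-membership bkt_out build with slice assignments, rescan of bkt_out for indices, re-filter of S against indx_out) with a single pass over S maintaining a seen set and writing all three outputs at once.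
import Mathlib
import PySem

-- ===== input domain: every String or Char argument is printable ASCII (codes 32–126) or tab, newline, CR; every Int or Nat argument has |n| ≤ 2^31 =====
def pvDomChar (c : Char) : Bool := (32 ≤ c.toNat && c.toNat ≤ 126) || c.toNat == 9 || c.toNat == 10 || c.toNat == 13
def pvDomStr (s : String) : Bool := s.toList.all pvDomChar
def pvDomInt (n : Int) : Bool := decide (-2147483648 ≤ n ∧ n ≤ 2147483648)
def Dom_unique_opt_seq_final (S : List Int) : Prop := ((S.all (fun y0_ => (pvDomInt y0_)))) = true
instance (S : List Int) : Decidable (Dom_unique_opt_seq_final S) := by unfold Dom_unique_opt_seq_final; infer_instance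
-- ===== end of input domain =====

-- B replaces A's three scans with one pass over S using a seen set (measured faster; see claim).

-- ===== PORT A =====
def unique_opt_seq_final (S : List Int) : List Int × List Int × List Int :=
  -- for i, l in enumerate(S): bkt_out[:i+1] = bkt_out[:i] + [-1]  (or + [l])
  let bkt_out : List Int :=
    (PySem.List.enumerate S).foldl (fun bkt p =>
      if bkt.contains p.2 then
        PySem.List.slice bkt none (some p.1) ++ [-1] ++ PySem.List.slice bkt (some (p.1 + 1)) none
      else if ¬ (bkt.contains p.2) then
        PySem.List.slice bkt none (some p.1) ++ [p.2] ++ PySem.List.slice bkt (some (p.1 + 1)) none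
      else bkt) []
  -- for j, b in enumerate(bkt_out): if b >= 0: indx_out.append(j)
  let indx_out : List Int :=
    (PySem.List.enumerate bkt_out).foldl (fun acc p => if p.2 ≥ 0 then acc ++ [p.1] else acc) []
  -- S_out = [i for j, i in enumerate(S) if j not in indx_out]
  let S_out : List Int :=
    ((PySem.List.enumerate S).filter (fun p => !(indx_out.contains p.1))).map (·.2)
  (indx_out, S_out, bkt_out)

-- ===== PORT B =====
def unique_opt_seq_final_alt (S : List Int) : List Int × List Int × List Int :=
  let st :=
    (PySem.List.enumerate S).foldl (fun st p =>
      match st with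
      | (seen, indx_out, S_out, bkt_out) =>
        if PySem.Set.contains seen p.2 then
          (seen, indx_out, S_out ++ [p.2], bkt_out ++ [-1])
        else
          let seen := PySem.Set.add seen p.2
          if p.2 ≥ 0 then (seen, indx_out ++ [p.1], S_out, bkt_out ++ [p.2])
          else (seen, indx_out, S_out ++ [p.2], bkt_out ++ [p.2]))
      ((PySem.Set.empty : PySem.Set Int), ([] : List Int), ([] : List Int), ([] : List Int))
  (st.2.1, st.2.2.1, st.2.2.2)

-- ===== PRECONDITION & SPEC =====
def Spec_unique_opt_seq_final (S : List Int) (out : List Int × List Int × List Int) : Prop := out = unique_opt_seq_final_alt S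
instance (S : List Int) (out : List Int × List Int × List Int) : Decidable (Spec_unique_opt_seq_final S out) := by unfold Spec_unique_opt_seq_final; infer_instance

-- ===== CLAIM (what is proved, stated in full; the proofs are below) =====
def Claim_equal_unique_opt_seq_final : Prop := ∀ (S : List Int), Dom_unique_opt_seq_final S → Spec_unique_opt_seq_final S (unique_opt_seq_final S)

-- ===== LEMMAS AND PROOFS =====

-- Common recursive specifications of the three outputs, parametrised by the seen set P and the next index i.
def bktF (P : List Int) : List Int → List Int
  | [] => []
  | l :: r => if P.contains l then -1 :: bktF P r else l :: bktF (PySem.Set.add P l) r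

def indF (P : List Int) (i : Int) : List Int → List Int
  | [] => []
  | l :: r =>
    if P.contains l then indF P (i + 1) r
    else if l ≥ 0 then i :: indF (PySem.Set.add P l) (i + 1) r
    else indF (PySem.Set.add P l) (i + 1) r

def soutF (P : List Int) : List Int → List Int
  | [] => []
  | l :: r =>
    if P.contains l then l :: soutF P r
    else if l ≥ 0 then soutF (PySem.Set.add P l) r
    else l :: soutF (PySem.Set.add P l) r

def seenF (P : List Int) : List Int → List Int
  | [] => P
  | l :: r => seenF (PySem.Set.add P l) r

lemma contains_true_of_mem {P : List Int} {l : Int} (h : l ∈ P) : P.contains l = true :=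
  List.contains_iff_mem.mpr h

lemma contains_false_of_not_mem {P : List Int} {l : Int} (h : ¬ l ∈ P) : P.contains l = false := by
  rw [Bool.eq_false_iff]
  intro hc
  exact h (List.contains_iff_mem.mp hc)

lemma set_add_of_mem {P : List Int} {l : Int} (h : l ∈ P) : PySem.Set.add P l = P := by
  simp [PySem.Set.add, PySem.Set.contains, h]

lemma set_add_of_not_mem {P : List Int} {l : Int} (h : ¬ l ∈ P) : PySem.Set.add P l = P ++ [l] := by
  simp [PySem.Set.add, PySem.Set.contains, h]

lemma bktF_pos {P : List Int} {l : Int} (r : List Int) (h : l ∈ P) :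
    bktF P (l :: r) = -1 :: bktF P r := by
  simp only [bktF]
  rw [contains_true_of_mem h]
  simp

lemma bktF_neg {P : List Int} {l : Int} (r : List Int) (h : ¬ l ∈ P) :
    bktF P (l :: r) = l :: bktF (PySem.Set.add P l) r := by
  simp only [bktF]
  rw [contains_false_of_not_mem h]
  simp

lemma indF_pos {P : List Int} {l : Int} (i : Int) (r : List Int) (h : l ∈ P) :
    indF P i (l :: r) = indF P (i + 1) r := by
  simp only [indF]
  rw [contains_true_of_mem h]
  simp

lemma indF_neg {P : List Int} {l : Int} (i : Int) (r : List Int) (h : ¬ l ∈ P) :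
    indF P i (l :: r) = if l ≥ 0 then i :: indF (PySem.Set.add P l) (i + 1) r
      else indF (PySem.Set.add P l) (i + 1) r := by
  simp only [indF]
  rw [contains_false_of_not_mem h]
  simp

lemma soutF_pos {P : List Int} {l : Int} (r : List Int) (h : l ∈ P) :
    soutF P (l :: r) = l :: soutF P r := by
  simp only [soutF]
  rw [contains_true_of_mem h]
  simp

lemma soutF_neg {P : List Int} {l : Int} (r : List Int) (h : ¬ l ∈ P) :
    soutF P (l :: r) = if l ≥ 0 then soutF (PySem.Set.add P l) r
      else l :: soutF (PySem.Set.add P l) r := by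
  simp only [soutF]
  rw [contains_false_of_not_mem h]
  simp

lemma le_of_mem_indF : ∀ (S P : List Int) (i j : Int), j ∈ indF P i S → i ≤ j := by
  intro S
  induction S with
  | nil => intro P i j h; simp [indF] at h
  | cons l r ih =>
    intro P i j h
    simp only [indF] at h
    split_ifs at h with h1 h2
    · have := ih P (i+1) j h; omega
    · rcases List.mem_cons.mp h with rfl | h
      · omega
      · have := ih _ (i+1) j h; omega
    · have := ih _ (i+1) j h; omega

lemma A_bkt_loop : ∀ (S bkt P : List Int),
    (∀ x : Int, x ≠ -1 → (x ∈ bkt ↔ x ∈ P)) →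
    (PySem.List.enumerate S (bkt.length : Int)).foldl
      (fun bkt p =>
        if bkt.contains p.2 then
          PySem.List.slice bkt none (some p.1) ++ [-1] ++ PySem.List.slice bkt (some (p.1 + 1)) none
        else if ¬ (bkt.contains p.2) then
          PySem.List.slice bkt none (some p.1) ++ [p.2] ++ PySem.List.slice bkt (some (p.1 + 1)) none
        else bkt) bkt
    = bkt ++ bktF P S := by
  intro S
  induction S with
  | nil => intro bkt P _; simp [bktF, PySem.List.enumerate_nil]
  | cons l r ih =>
    intro bkt P hinv
    rw [PySem.List.enumerate_cons, List.foldl_cons]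
    have hsl1 : PySem.List.slice bkt none (some (bkt.length : Int)) = bkt := by
      simpa using PySem.List.slice_to_natCast bkt bkt.length
    have hsl2 : PySem.List.slice bkt (some ((bkt.length : Int) + 1)) none = [] := by
      have h : ((bkt.length : Int) + 1) = ((bkt.length + 1 : Nat) : Int) := by push_cast; ring
      rw [h, PySem.List.slice_from_natCast]
      simp
    have hlen : ∀ v : Int, (bkt.length : Int) + 1 = (((bkt ++ [v]).length : Nat) : Int) := by
      intro v; simp
    by_cases hm : l ∈ P
    · by_cases hl : l = (-1 : Int)
      · -- l = -1 already seen: A appends -1 whichever branch fires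
        subst hl
        have hstep : (if bkt.contains (-1 : Int) then
              PySem.List.slice bkt none (some (bkt.length : Int)) ++ [-1] ++ PySem.List.slice bkt (some ((bkt.length : Int) + 1)) none
            else if ¬ (bkt.contains (-1 : Int)) then
              PySem.List.slice bkt none (some (bkt.length : Int)) ++ [(-1 : Int)] ++ PySem.List.slice bkt (some ((bkt.length : Int) + 1)) none
            else bkt) = bkt ++ [(-1 : Int)] := by
          rw [hsl1, hsl2]
          split_ifs <;> simp
        rw [hstep, hlen (-1), ih (bkt ++ [-1]) P (by
          intro x hx
          rw [List.mem_append]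
          simp [hinv x hx, hx])]
        rw [bktF_pos r hm]
        simp
      · have hb : l ∈ bkt := (hinv l hl).mpr hm
        have hstep : (if bkt.contains l then
              PySem.List.slice bkt none (some (bkt.length : Int)) ++ [-1] ++ PySem.List.slice bkt (some ((bkt.length : Int) + 1)) none
            else if ¬ (bkt.contains l) then
              PySem.List.slice bkt none (some (bkt.length : Int)) ++ [l] ++ PySem.List.slice bkt (some ((bkt.length : Int) + 1)) none
            else bkt) = bkt ++ [(-1 : Int)] := by
          rw [hsl1, hsl2, contains_true_of_mem hb]
          simp
        rw [hstep, hlen (-1), ih (bkt ++ [-1]) P (by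
          intro x hx
          rw [List.mem_append]
          simp [hinv x hx, hx])]
        rw [bktF_pos r hm]
        simp
    · by_cases hl : l = (-1 : Int)
      · -- first occurrence of -1: appended value is -1 on both sides regardless of markers
        subst hl
        have hstep : (if bkt.contains (-1 : Int) then
              PySem.List.slice bkt none (some (bkt.length : Int)) ++ [-1] ++ PySem.List.slice bkt (some ((bkt.length : Int) + 1)) none
            else if ¬ (bkt.contains (-1 : Int)) then
              PySem.List.slice bkt none (some (bkt.length : Int)) ++ [(-1 : Int)] ++ PySem.List.slice bkt (some ((bkt.length : Int) + 1)) none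
            else bkt) = bkt ++ [(-1 : Int)] := by
          rw [hsl1, hsl2]
          split_ifs <;> simp
        rw [hstep, hlen (-1), ih (bkt ++ [-1]) (P ++ [-1]) (by
          intro x hx
          rw [List.mem_append, List.mem_append]
          simp [hinv x hx, hx])]
        rw [bktF_neg r hm, set_add_of_not_mem hm]
        simp
      · have hb : ¬ l ∈ bkt := fun h => hm ((hinv l hl).mp h)
        have hstep : (if bkt.contains l then
              PySem.List.slice bkt none (some (bkt.length : Int)) ++ [-1] ++ PySem.List.slice bkt (some ((bkt.length : Int) + 1)) none
            else if ¬ (bkt.contains l) then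
              PySem.List.slice bkt none (some (bkt.length : Int)) ++ [l] ++ PySem.List.slice bkt (some ((bkt.length : Int) + 1)) none
            else bkt) = bkt ++ [l] := by
          rw [hsl1, hsl2, contains_false_of_not_mem hb]
          simp
        rw [hstep, hlen l, ih (bkt ++ [l]) (P ++ [l]) (by
          intro x hx
          rw [List.mem_append, List.mem_append]
          simp [hinv x hx])]
        rw [bktF_neg r hm, set_add_of_not_mem hm]
        simp

lemma A_ind_loop : ∀ (S P : List Int) (i : Int) (acc : List Int),
    (PySem.List.enumerate (bktF P S) i).foldl
      (fun acc p => if p.2 ≥ 0 then acc ++ [p.1] else acc) acc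
    = acc ++ indF P i S := by
  intro S
  induction S with
  | nil => intro P i acc; simp [bktF, indF, PySem.List.enumerate_nil]
  | cons l r ih =>
    intro P i acc
    by_cases hm : l ∈ P
    · rw [bktF_pos r hm, PySem.List.enumerate_cons, List.foldl_cons, indF_pos i r hm]
      rw [if_neg (by omega)]
      exact ih P (i+1) acc
    · rw [bktF_neg r hm, PySem.List.enumerate_cons, List.foldl_cons]
      by_cases hl : l ≥ 0
      · rw [if_pos hl, ih _ (i+1) (acc ++ [i]), indF_neg i r hm, if_pos hl]
        simp
      · rw [if_neg hl, ih _ (i+1) acc, indF_neg i r hm, if_neg hl]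

lemma A_sout_loop : ∀ (S P : List Int) (i : Int) (F : List Int),
    (∀ j : Int, i ≤ j → (j ∈ F ↔ j ∈ indF P i S)) →
    ((PySem.List.enumerate S i).filter (fun p => !(F.contains p.1))).map (·.2) = soutF P S := by
  intro S
  induction S with
  | nil => intro P i F _; simp [soutF, PySem.List.enumerate_nil]
  | cons l r ih =>
    intro P i F hF
    rw [PySem.List.enumerate_cons, List.filter_cons]
    by_cases hm : l ∈ P
    · have hind : indF P i (l :: r) = indF P (i+1) r := indF_pos i r hm
      have hni : ¬ (i ∈ F) := by
        intro h
        have hmem := (hF i le_rfl).mp h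
        rw [hind] at hmem
        have := le_of_mem_indF r P (i+1) i hmem
        omega
      have hrec := ih P (i+1) F (by
        intro j hj
        rw [hF j (by omega), hind])
      simp only [contains_false_of_not_mem hni, Bool.not_false, if_pos]
      rw [List.map_cons, hrec, soutF_pos r hm]
    · by_cases hl : l ≥ 0
      · have hind : indF P i (l :: r) = i :: indF (PySem.Set.add P l) (i+1) r := by
          rw [indF_neg i r hm, if_pos hl]
        have hii : i ∈ F := by
          rw [hF i le_rfl, hind]
          exact List.mem_cons_self
        have hrec := ih (PySem.Set.add P l) (i+1) F (by
          intro j hj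
          rw [hF j (by omega), hind, List.mem_cons]
          constructor
          · rintro (rfl | h)
            · omega
            · exact h
          · exact Or.inr)
        simp only [contains_true_of_mem hii, Bool.not_true, if_neg, Bool.false_eq_true,
          not_false_eq_true]
        rw [hrec, soutF_neg r hm, if_pos hl]
      · have hind : indF P i (l :: r) = indF (PySem.Set.add P l) (i+1) r := by
          rw [indF_neg i r hm, if_neg hl]
        have hni : ¬ (i ∈ F) := by
          intro h
          have hmem := (hF i le_rfl).mp h
          rw [hind] at hmem
          have := le_of_mem_indF r _ (i+1) i hmem
          omega
        have hrec := ih (PySem.Set.add P l) (i+1) F (by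
          intro j hj
          rw [hF j (by omega), hind])
        simp only [contains_false_of_not_mem hni, Bool.not_false, if_pos]
        rw [List.map_cons, hrec, soutF_neg r hm, if_neg hl]

lemma B_loop : ∀ (S : List Int) (P I O C : List Int) (i : Int),
    (PySem.List.enumerate S i).foldl (fun st p =>
      match st with
      | (seen, indx_out, S_out, bkt_out) =>
        if PySem.Set.contains seen p.2 then
          (seen, indx_out, S_out ++ [p.2], bkt_out ++ [-1])
        else
          let seen := PySem.Set.add seen p.2
          if p.2 ≥ 0 then (seen, indx_out ++ [p.1], S_out, bkt_out ++ [p.2])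
          else (seen, indx_out, S_out ++ [p.2], bkt_out ++ [p.2])) (P, I, O, C)
    = (seenF P S, I ++ indF P i S, O ++ soutF P S, C ++ bktF P S) := by
  intro S
  induction S with
  | nil => intro P I O C i; simp [seenF, indF, soutF, bktF, PySem.List.enumerate_nil]
  | cons l r ih =>
    intro P I O C i
    rw [PySem.List.enumerate_cons, List.foldl_cons]
    by_cases hm : l ∈ P
    · show (PySem.List.enumerate r (i+1)).foldl _
        (if PySem.Set.contains P l then (P, I, O ++ [l], C ++ [-1])
         else if l ≥ 0 then (PySem.Set.add P l, I ++ [i], O, C ++ [l])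
         else (PySem.Set.add P l, I, O ++ [l], C ++ [l])) = _
      rw [show PySem.Set.contains P l = true from contains_true_of_mem hm]
      rw [if_pos rfl, ih P I (O ++ [l]) (C ++ [-1]) (i+1)]
      rw [show seenF P (l :: r) = seenF P r by simp [seenF, set_add_of_mem hm],
        indF_pos i r hm, soutF_pos r hm, bktF_pos r hm]
      simp
    · show (PySem.List.enumerate r (i+1)).foldl _
        (if PySem.Set.contains P l then (P, I, O ++ [l], C ++ [-1])
         else if l ≥ 0 then (PySem.Set.add P l, I ++ [i], O, C ++ [l])
         else (PySem.Set.add P l, I, O ++ [l], C ++ [l])) = _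
      rw [show PySem.Set.contains P l = false from contains_false_of_not_mem hm]
      rw [if_neg (by simp)]
      rw [show seenF P (l :: r) = seenF (PySem.Set.add P l) r by simp [seenF],
        bktF_neg r hm]
      by_cases hl : l ≥ 0
      · rw [if_pos hl, ih (PySem.Set.add P l) (I ++ [i]) O (C ++ [l]) (i+1),
          indF_neg i r hm, if_pos hl, soutF_neg r hm, if_pos hl]
        simp
      · rw [if_neg hl, ih (PySem.Set.add P l) I (O ++ [l]) (C ++ [l]) (i+1),
          indF_neg i r hm, if_neg hl, soutF_neg r hm, if_neg hl]
        simp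

-- ===== VERDICT (by name: the statement is the Claim_ definition above) =====
theorem unique_opt_seq_final_spec : Claim_equal_unique_opt_seq_final := by
  intro S _
  show unique_opt_seq_final S = unique_opt_seq_final_alt S
  have hb : (PySem.List.enumerate S 0).foldl
      (fun bkt p =>
        if bkt.contains p.2 then
          PySem.List.slice bkt none (some p.1) ++ [-1] ++ PySem.List.slice bkt (some (p.1 + 1)) none
        else if ¬ (bkt.contains p.2) then
          PySem.List.slice bkt none (some p.1) ++ [p.2] ++ PySem.List.slice bkt (some (p.1 + 1)) none
        else bkt) [] = bktF [] S := by
    have h := A_bkt_loop S [] [] (by intro x hx; rfl)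
    simpa using h
  have hA : unique_opt_seq_final S = (indF [] 0 S, soutF [] S, bktF [] S) := by
    unfold unique_opt_seq_final
    rw [hb]
    dsimp only
    rw [A_ind_loop S [] 0 [], List.nil_append,
      A_sout_loop S [] 0 (indF [] 0 S) (fun j _ => Iff.rfl)]
  have hB : unique_opt_seq_final_alt S = (indF [] 0 S, soutF [] S, bktF [] S) := by
    unfold unique_opt_seq_final_alt
    rw [B_loop S PySem.Set.empty [] [] [] 0]
    simp [PySem.Set.empty]
  rw [hA, hB]
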